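-- pv_equiv track=rewrite | github.com/SpiritSeal/haunted-transcription-smle | assemble_v4.py | cap_polyphony_by_onset
-- ===== SOURCE A (Python) =====
-- def cap_polyphony_by_onset(notes, max_voices):
--     by_onset = {}
--     for n in notes:
--         by_onset.setdefault(n[0], []).append(n)
--     out = []
--     for s, bucket in by_onset.items():
--         bucket.sort(key=lambda x: (-x[3], x[2]))
--         out.extend(bucket[:max_voices])
--     return sorted(out, key=lambda x: (x[0], x[2]))
-- ===== SOURCE B (Python) =====
-- def cap_polyphony_by_onset(notes, max_voices):
--     # Sort-then-scan instead of dict grouping: a two-pass stable sort makes each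
--     # onset's notes contiguous in (-pitch, start) order; one linear scan slices
--     # each run, then a final sort orders the kept notes by (onset, start).
--     srt = sorted(notes, key=lambda n: (-n[3], n[2]))
--     srt.sort(key=lambda n: n[0])
--     out = []
--     run = []
--     for n in srt:
--         if run and run[0][0] != n[0]:
--             out.extend(run[:max_voices])
--             run = []
--         run.append(n)
--     if run:
--         out.extend(run[:max_voices])
--     out.sort(key=lambda x: (x[0], x[2]))
--     return out
-- ===== Notes on version B (the rewrite author's own statement) =====
-- stated objective: alternative
-- what changed: B drops A's grouping dict entirely: a two-pass stable global sort (by (-pitch,start), then by onset) makes each onset's notes a contiguous run already in A's per-bucket order, a single linear scan with a run accumulator slices each run to max_voices, and a final stable sort by (onset,start) orders the output.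
import Mathlib
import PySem

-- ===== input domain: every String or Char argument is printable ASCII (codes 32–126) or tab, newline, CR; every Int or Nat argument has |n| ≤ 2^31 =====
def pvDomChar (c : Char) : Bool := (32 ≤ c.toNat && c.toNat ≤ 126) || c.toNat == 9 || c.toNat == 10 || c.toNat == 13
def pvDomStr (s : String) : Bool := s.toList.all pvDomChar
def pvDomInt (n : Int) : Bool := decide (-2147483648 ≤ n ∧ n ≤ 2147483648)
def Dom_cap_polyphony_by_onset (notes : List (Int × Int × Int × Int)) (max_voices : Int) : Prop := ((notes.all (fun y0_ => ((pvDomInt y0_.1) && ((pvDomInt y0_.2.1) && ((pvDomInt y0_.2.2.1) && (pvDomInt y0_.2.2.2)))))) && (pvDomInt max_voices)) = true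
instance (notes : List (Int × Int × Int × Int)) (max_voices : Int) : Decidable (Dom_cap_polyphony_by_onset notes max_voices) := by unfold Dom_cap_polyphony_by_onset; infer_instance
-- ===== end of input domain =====

-- B replaces A's grouping dict by a two-pass stable global sort followed by one linear
-- run-slicing scan (objective: alternative; same asymptotic cost).

-- ===== PORT A =====
def cap_polyphony_by_onset (notes : List (Int × Int × Int × Int)) (max_voices : Int) : List (Int × Int × Int × Int) :=
  -- by_onset.setdefault(n[0], []).append(n)  ==  by_onset[n[0]] = by_onset.get(n[0], []) + [n]
  let by_onset : PySem.Dict Int (List (Int × Int × Int × Int)) :=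
    notes.foldl (fun d n => d.modify n.1 [] (fun b => b ++ [n])) PySem.Dict.empty
  let out := by_onset.items.foldl (fun out sb =>
    out ++ PySem.List.slice (PySem.List.sorted2 sb.2 (fun x => -x.2.2.2) (fun x => x.2.2.1) false) none (some max_voices)) []
  PySem.List.sorted2 out (fun x => x.1) (fun x => x.2.2.1) false

-- ===== PORT B =====
def cap_polyphony_by_onset_alt (notes : List (Int × Int × Int × Int)) (max_voices : Int) : List (Int × Int × Int × Int) :=
  -- srt = sorted(notes, key=(-pitch, start)); srt.sort(key=onset)  (two-pass stable sort)
  let srt := PySem.List.sorted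
    (PySem.List.sorted2 notes (fun n => -n.2.2.2) (fun n => n.2.2.1) false) (fun n => n.1) false
  -- for n in srt: flush the run when the onset changes, else extend it
  let st := srt.foldl (fun (st : List (Int × Int × Int × Int) × List (Int × Int × Int × Int)) n =>
    if st.2 ≠ [] ∧ st.2.headI.1 ≠ n.1 then
      (st.1 ++ PySem.List.slice st.2 none (some max_voices), [n])
    else (st.1, st.2 ++ [n])) ([], [])
  -- if run: out.extend(run[:max_voices])
  let out := if st.2 ≠ [] then st.1 ++ PySem.List.slice st.2 none (some max_voices) else st.1
  PySem.List.sorted2 out (fun x => x.1) (fun x => x.2.2.1) false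

-- ===== PRECONDITION & SPEC =====
def Spec_cap_polyphony_by_onset (notes : List (Int × Int × Int × Int)) (max_voices : Int) (out : List (Int × Int × Int × Int)) : Prop := out = cap_polyphony_by_onset_alt notes max_voices
instance (notes : List (Int × Int × Int × Int)) (max_voices : Int) (out : List (Int × Int × Int × Int)) : Decidable (Spec_cap_polyphony_by_onset notes max_voices out) := by unfold Spec_cap_polyphony_by_onset; infer_instance

-- ===== CLAIM (what is proved, stated in full; the proofs are below) =====
def Claim_equal_cap_polyphony_by_onset : Prop := ∀ (notes : List (Int × Int × Int × Int)) (max_voices : Int), Dom_cap_polyphony_by_onset notes max_voices → Spec_cap_polyphony_by_onset notes max_voices (cap_polyphony_by_onset notes max_voices)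

-- ===== LEMMAS AND PROOFS =====

abbrev PvQ : Type := Int × Int × Int × Int

-- the four comparators appearing in the two programs, as insertion-sort "before" tests
def pvBA (x y : PvQ) : Bool :=
  decide (x.1 < y.1) || (!decide (y.1 < x.1) && decide (x.2.2.1 < y.2.2.1))
def pvBB (x y : PvQ) : Bool := decide (x.2.2.1 < y.2.2.1)
def pvBO (x y : PvQ) : Bool := decide (x.1 < y.1)
def pvB2 (x y : PvQ) : Bool :=
  decide (-x.2.2.2 < -y.2.2.2) || (!decide (-y.2.2.2 < -x.2.2.2) && decide (x.2.2.1 < y.2.2.1))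

def pvIsort (b : PvQ → PvQ → Bool) (l : List PvQ) : List PvQ :=
  l.foldl (fun acc x => PySem.List.insertBy b x acc) []

lemma sorted2_eq_pvIsortA (l : List PvQ) :
    PySem.List.sorted2 l (fun x => x.1) (fun x => x.2.2.1) false = pvIsort pvBA l := rfl
lemma sorted2_eq_pvIsortB2 (l : List PvQ) :
    PySem.List.sorted2 l (fun x => -x.2.2.2) (fun x => x.2.2.1) false = pvIsort pvB2 l := rfl
lemma sorted_eq_pvIsortO (l : List PvQ) :
    PySem.List.sorted l (fun x => x.1) false = pvIsort pvBO l := rfl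

-- ---- generic facts about stable insertion sort with an asymmetric, negatively transitive comparator ----

lemma g_insert_front (b : PvQ → PvQ → Bool) (x : PvQ) (l : List PvQ)
    (h : ∀ z ∈ l, b x z = true) : PySem.List.insertBy b x l = x :: l := by
  cases l with
  | nil => rfl
  | cons y ys => simp [PySem.List.insertBy, h y (by simp)]

lemma g_insert_pairwise (b : PvQ → PvQ → Bool)
    (hasym : ∀ x y, b x y = true → b y x = false)
    (htrans : ∀ x y z, b x y = true → b z y = false → b x z = true)
    (x : PvQ) {l : List PvQ} (h : l.Pairwise (fun y z => b z y = false)) :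
    (PySem.List.insertBy b x l).Pairwise (fun y z => b z y = false) := by
  induction l with
  | nil => simp [PySem.List.insertBy]
  | cons y ys ih =>
    rcases List.pairwise_cons.mp h with ⟨hy, hys⟩
    by_cases hxy : b x y = true
    · rw [show PySem.List.insertBy b x (y :: ys) = x :: y :: ys by simp [PySem.List.insertBy, hxy]]
      refine List.pairwise_cons.mpr ⟨?_, h⟩
      intro z hz
      rcases List.mem_cons.mp hz with rfl | hz
      · exact hasym _ _ hxy
      · exact hasym _ _ (htrans _ _ _ hxy (hy z hz))
    · rw [show PySem.List.insertBy b x (y :: ys) = y :: PySem.List.insertBy b x ys by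
        simp [PySem.List.insertBy, hxy]]
      refine List.pairwise_cons.mpr ⟨?_, ih hys⟩
      intro z hz
      rcases (PySem.List.mem_insertBy b x z ys).mp hz with rfl | hz
      · exact Bool.eq_false_iff.mpr hxy
      · exact hy z hz

lemma g_isort_pairwise (b : PvQ → PvQ → Bool)
    (hasym : ∀ x y, b x y = true → b y x = false)
    (htrans : ∀ x y z, b x y = true → b z y = false → b x z = true)
    (l : List PvQ) : (pvIsort b l).Pairwise (fun y z => b z y = false) := by
  suffices h : ∀ acc, acc.Pairwise (fun y z => b z y = false) →
      (l.foldl (fun acc x => PySem.List.insertBy b x acc) acc).Pairwise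
        (fun y z => b z y = false) from h [] (by simp)
  induction l with
  | nil => intro acc h; simpa using h
  | cons x t ih => intro acc h; exact ih _ (g_insert_pairwise b hasym htrans x h)

lemma g_filter_insert (b : PvQ → PvQ → Bool)
    (htrans : ∀ x y z, b x y = true → b z y = false → b x z = true)
    (p : PvQ → Bool) (x : PvQ) (l : List PvQ)
    (h : l.Pairwise (fun y z => b z y = false)) :
    (PySem.List.insertBy b x l).filter p =
      if p x then PySem.List.insertBy b x (l.filter p) else l.filter p := by
  induction l with
  | nil => by_cases hpx : p x = true <;> simp [PySem.List.insertBy, hpx]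
  | cons y ys ih =>
    rcases List.pairwise_cons.mp h with ⟨hy, hys⟩
    have ihys := ih hys
    by_cases hxy : b x y = true
    · rw [show PySem.List.insertBy b x (y :: ys) = x :: y :: ys by simp [PySem.List.insertBy, hxy]]
      by_cases hpx : p x = true
      · have hfront : PySem.List.insertBy b x ((y :: ys).filter p) =
            x :: (y :: ys).filter p := by
          apply g_insert_front
          intro z hz
          rcases List.mem_cons.mp (List.mem_filter.mp hz).1 with rfl | hz'
          · exact hxy
          · exact htrans _ _ _ hxy (hy z hz')
        rw [if_pos hpx, hfront]
        simp [List.filter_cons, hpx]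
      · rw [if_neg hpx]
        simp [List.filter_cons, hpx]
    · rw [show PySem.List.insertBy b x (y :: ys) = y :: PySem.List.insertBy b x ys by
        simp [PySem.List.insertBy, hxy]]
      by_cases hpy : p y = true
      · by_cases hpx : p x = true
        · simp only [List.filter_cons, hpy, if_true, ihys, if_pos hpx]
          rw [show PySem.List.insertBy b x (y :: List.filter p ys) =
              y :: PySem.List.insertBy b x (List.filter p ys) by
            simp [PySem.List.insertBy, hxy]]
        · simp [hpy, ihys, hpx]
      · by_cases hpx : p x = true <;> simp [hpy, ihys, hpx]

lemma g_filter_foldl (b : PvQ → PvQ → Bool)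
    (hasym : ∀ x y, b x y = true → b y x = false)
    (htrans : ∀ x y z, b x y = true → b z y = false → b x z = true)
    (p : PvQ → Bool) (l : List PvQ) :
    ∀ acc, acc.Pairwise (fun y z => b z y = false) →
      (l.foldl (fun acc x => PySem.List.insertBy b x acc) acc).filter p =
        (l.filter p).foldl (fun acc x => PySem.List.insertBy b x acc) (acc.filter p) := by
  induction l with
  | nil => intro acc _; simp
  | cons x t ih =>
    intro acc h
    rw [List.foldl_cons, ih _ (g_insert_pairwise b hasym htrans x h),
      g_filter_insert b htrans p x acc h]
    by_cases hpx : p x = true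
    · rw [if_pos hpx]; simp [hpx]
    · rw [if_neg hpx]; simp [hpx]

lemma g_filter_isort (b : PvQ → PvQ → Bool)
    (hasym : ∀ x y, b x y = true → b y x = false)
    (htrans : ∀ x y z, b x y = true → b z y = false → b x z = true)
    (p : PvQ → Bool) (l : List PvQ) :
    (pvIsort b l).filter p = pvIsort b (l.filter p) := by
  simpa using g_filter_foldl b hasym htrans p l [] (by simp)

lemma g_insert_append (b : PvQ → PvQ → Bool) (x : PvQ) (l : List PvQ)
    (h : ∀ y ∈ l, b x y = false) : PySem.List.insertBy b x l = l ++ [x] := by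
  induction l with
  | nil => rfl
  | cons y ys ih =>
    have hxy := h y (by simp)
    rw [show PySem.List.insertBy b x (y :: ys) = y :: PySem.List.insertBy b x ys by
      simp [PySem.List.insertBy, hxy]]
    rw [ih (fun z hz => h z (by simp [hz]))]
    simp

lemma g_isort_id (b : PvQ → PvQ → Bool) (l : List PvQ)
    (h : ∀ x ∈ l, ∀ y ∈ l, b x y = false) : pvIsort b l = l := by
  suffices haux : ∀ (l' acc : List PvQ), (∀ x ∈ l', ∀ y ∈ acc, b x y = false) →
      (∀ x ∈ l', ∀ y ∈ l', b x y = false) →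
      l'.foldl (fun acc x => PySem.List.insertBy b x acc) acc = acc ++ l' by
    simpa using haux l [] (by simp) h
  intro l'
  induction l' with
  | nil => intro acc _ _; simp
  | cons x t ih =>
    intro acc h1 h2
    rw [List.foldl_cons, g_insert_append b x acc (h1 x (by simp))]
    rw [ih (acc ++ [x]) ?_ (fun z hz y hy => h2 z (by simp [hz]) y (by simp [hy]))]
    · simp
    · intro z hz y hy
      rcases List.mem_append.mp hy with hy | hy
      · exact h1 z (by simp [hz]) y hy
      · rw [List.mem_singleton.mp hy]
        exact h2 z (by simp [hz]) x (by simp)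

-- the comparators satisfy asymmetry and negative transitivity
lemma pvBA_asym : ∀ x y, pvBA x y = true → pvBA y x = false := by
  intro x y; simp [pvBA]; omega
lemma pvBA_trans2 : ∀ x y z, pvBA x y = true → pvBA z y = false → pvBA x z = true := by
  intro x y z; simp [pvBA]; omega
lemma pvBO_asym : ∀ x y, pvBO x y = true → pvBO y x = false := by
  intro x y; simp [pvBO]; omega
lemma pvBO_trans2 : ∀ x y z, pvBO x y = true → pvBO z y = false → pvBO x z = true := by
  intro x y z; simp [pvBO]; omega
lemma pvB2_asym : ∀ x y, pvB2 x y = true → pvB2 y x = false := by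
  intro x y; simp [pvB2]; omega
lemma pvB2_trans2 : ∀ x y z, pvB2 x y = true → pvB2 z y = false → pvB2 x z = true := by
  intro x y z; simp [pvB2]; omega

-- ---- A's final comparator, as the lexicographic (onset, start) order ----
def pvLeA (x y : PvQ) : Prop :=
  x.1 < y.1 ∨ (x.1 = y.1 ∧ x.2.2.1 ≤ y.2.2.1)

lemma pvBA_false_iff (x y : PvQ) : pvBA x y = false ↔ pvLeA y x := by
  simp [pvBA, pvLeA]; omega

lemma pv_isortA_pairwise (l : List PvQ) : (pvIsort pvBA l).Pairwise pvLeA :=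
  (g_isort_pairwise pvBA pvBA_asym pvBA_trans2 l).imp (fun h => (pvBA_false_iff _ _).mp h)

lemma pv_mem_isortA (l : List PvQ) (x : PvQ) : x ∈ pvIsort pvBA l ↔ x ∈ l := by
  have h := PySem.List.sorted2_perm l (fun x => x.1) (fun x => x.2.2.1) false
  rw [sorted2_eq_pvIsortA] at h
  exact h.mem_iff

lemma pv_mem_isortB2 (l : List PvQ) (x : PvQ) : x ∈ pvIsort pvB2 l ↔ x ∈ l := by
  have h := PySem.List.sorted2_perm l (fun x => -x.2.2.2) (fun x => x.2.2.1) false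
  rw [sorted2_eq_pvIsortB2] at h
  exact h.mem_iff

lemma pv_insert_const (k : Int) (x : PvQ)
    (l : List PvQ) (hx : x.1 = k) (hl : ∀ z ∈ l, z.1 = k) :
    PySem.List.insertBy pvBA x l = PySem.List.insertBy pvBB x l := by
  induction l with
  | nil => rfl
  | cons y ys ih =>
    have hy : y.1 = k := hl y (by simp)
    have hb : pvBA x y = pvBB x y := by simp [pvBA, pvBB, hx, hy]
    by_cases hxy : pvBB x y = true
    · simp [PySem.List.insertBy, hb, hxy]
    · rw [show PySem.List.insertBy pvBA x (y :: ys) = y :: PySem.List.insertBy pvBA x ys by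
          simp [PySem.List.insertBy, hb, hxy],
        show PySem.List.insertBy pvBB x (y :: ys) = y :: PySem.List.insertBy pvBB x ys by
          simp [PySem.List.insertBy, hxy],
        ih (fun z hz => hl z (by simp [hz]))]

lemma pv_isort_const (k : Int) (l : List PvQ)
    (hl : ∀ z ∈ l, z.1 = k) : pvIsort pvBA l = pvIsort pvBB l := by
  suffices h : ∀ (l : List PvQ) acc, (∀ z ∈ l, z.1 = k) → (∀ z ∈ acc, z.1 = k) →
      l.foldl (fun acc x => PySem.List.insertBy pvBA x acc) acc =
        l.foldl (fun acc x => PySem.List.insertBy pvBB x acc) acc by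
    exact h l [] hl (by simp)
  intro l
  induction l with
  | nil => intro acc _ _; rfl
  | cons x t ih =>
    intro acc hlk hacc
    have hx : x.1 = k := hlk x (by simp)
    rw [List.foldl_cons, List.foldl_cons,
      pv_insert_const k x acc hx hacc]
    exact ih _ (fun z hz => hlk z (by simp [hz]))
      (fun z hz => by
        rcases (PySem.List.mem_insertBy pvBB x z acc).mp hz with rfl | hz
        · exact hx
        · exact hacc z hz)

lemma pv_filter_key_split (k : Int) (l : List PvQ)
    (h : l.Pairwise pvLeA) (hall : ∀ x ∈ l, x.1 = k ∨ k < x.1) :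
    l.filter (fun z => z.1 == k) ++ l.filter (fun z => z.1 != k) = l := by
  induction l with
  | nil => simp
  | cons x t ih =>
    rcases List.pairwise_cons.mp h with ⟨hx, ht⟩
    rcases hall x (by simp) with hk | hk
    · have h1 := ih ht (fun y hy => hall y (by simp [hy]))
      have hpx : (x.1 == k) = true := by simp [hk]
      have hnx : (x.1 != k) = false := by simp [hk]
      simp only [List.filter_cons, hpx, hnx, if_true, if_false, Bool.false_eq_true,
        List.cons_append]
      rw [h1]
    · have hne : ∀ y ∈ x :: t, (y.1 == k) = false := by
        intro y hy
        rcases List.mem_cons.mp hy with hyx | hy'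
        · rw [hyx]; simp; omega
        · have h1 := hx y hy'
          unfold pvLeA at h1
          simp; omega
      have hpx : (x.1 == k) = false := hne x (by simp)
      have hnx : (x.1 != k) = true := by simp [bne, hpx]
      have h1 : t.filter (fun z => z.1 == k) = [] :=
        List.filter_eq_nil_iff.mpr (fun y hy => by simp [hne y (by simp [hy])])
      have h2 : t.filter (fun z => z.1 != k) = t :=
        List.filter_eq_self.mpr (fun y hy => by simp [bne, hne y (by simp [hy])])
      simp [hpx, hnx, h1, h2]

lemma pv_sorted_decomp : ∀ (ks : List Int) (l : List PvQ),
    l.Pairwise pvLeA → ks.Pairwise (· < ·) → (∀ x ∈ l, x.1 ∈ ks) →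
    ks.flatMap (fun k => l.filter (fun z => z.1 == k)) = l := by
  intro ks
  induction ks with
  | nil =>
    intro l _ _ hmem
    cases l with
    | nil => simp
    | cons x t => exact absurd (hmem x (by simp)) (by simp)
  | cons k ks ih =>
    intro l hl hks hmem
    rcases List.pairwise_cons.mp hks with ⟨hklt, hks'⟩
    have hall : ∀ x ∈ l, x.1 = k ∨ k < x.1 := by
      intro x hx
      rcases List.mem_cons.mp (hmem x hx) with h | h
      · exact Or.inl h
      · exact Or.inr (hklt _ h)
    rw [List.flatMap_cons]
    have hcongr : ∀ k' ∈ ks, l.filter (fun z => z.1 == k') =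
        (l.filter (fun z => z.1 != k)).filter (fun z => z.1 == k') := by
      intro k' hk'
      rw [List.filter_filter]
      apply List.filter_congr
      intro x hx
      by_cases h : x.1 = k'
      · simp [h]
        have := hklt _ hk'
        omega
      · simp [h]
    rw [List.flatMap_congr hcongr,
      ih (l.filter (fun z => z.1 != k)) (hl.sublist List.filter_sublist) hks'
        (by
          intro x hx
          rcases List.mem_filter.mp hx with ⟨hxl, hxne⟩
          rcases List.mem_cons.mp (hmem x hxl) with h | h
          · exact absurd h (by simpa using hxne)
          · exact h)]
    exact pv_filter_key_split k l hl hall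

lemma pv_flatMap_filter_single : ∀ (K : List Int), K.Nodup →
    ∀ (g : Int → List PvQ), (∀ k' ∈ K, ∀ x ∈ g k', x.1 = k') →
    ∀ k, k ∈ K → (K.flatMap g).filter (fun z => z.1 == k) = g k := by
  intro K
  induction K with
  | nil => intro _ _ _ k hk; exact absurd hk (by simp)
  | cons k0 K ih =>
    intro hnd g hg k hk
    rcases List.nodup_cons.mp hnd with ⟨hk0, hnd'⟩
    rw [List.flatMap_cons, List.filter_append]
    by_cases hkk : k = k0
    · subst hkk
      have h1 : (g k).filter (fun z => z.1 == k) = g k :=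
        List.filter_eq_self.mpr (fun x hx => by simp [hg k (by simp) x hx])
      have h2 : (K.flatMap g).filter (fun z => z.1 == k) = [] := by
        apply List.filter_eq_nil_iff.mpr
        intro x hx
        rcases List.mem_flatMap.mp hx with ⟨k', hk', hx'⟩
        have h3 : x.1 = k' := hg k' (by simp [hk']) x hx'
        have h4 : k' ≠ k := fun h => hk0 (h ▸ hk')
        simp [h3]
        exact h4
      rw [h1, h2, List.append_nil]
    · have hkK : k ∈ K := by
        rcases List.mem_cons.mp hk with h | h
        · exact absurd h hkk
        · exact h
      have h1 : (g k0).filter (fun z => z.1 == k) = [] := by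
        apply List.filter_eq_nil_iff.mpr
        intro x hx
        have h3 : x.1 = k0 := hg k0 (by simp) x hx
        simp [h3]
        omega
      rw [h1, List.nil_append]
      exact ih hnd' g (fun k' hk' => hg k' (by simp [hk'])) k hkK

lemma pv_core (K : List Int) (g : Int → List PvQ) (hK : K.Nodup)
    (hg : ∀ k ∈ K, ∀ x ∈ g k, x.1 = k) :
    pvIsort pvBA (K.flatMap g) =
      (PySem.List.sorted K (fun k => k) false).flatMap (fun k => pvIsort pvBB (g k)) := by
  have hperm : (PySem.List.sorted K (fun k => k) false).Perm K :=
    PySem.List.sorted_perm K (fun k => k) false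
  have hkslt : (PySem.List.sorted K (fun k => k) false).Pairwise (· < ·) := by
    have h1 : (PySem.List.sorted K (fun k => k) false).Pairwise (fun a b => a ≤ b) :=
      PySem.List.sorted_pairwise K (fun k => k)
    have h2 : (PySem.List.sorted K (fun k => k) false).Nodup := hperm.nodup_iff.mpr hK
    exact (h1.and h2).imp (by intro a b h; omega)
  have hmem : ∀ x ∈ pvIsort pvBA (K.flatMap g), x.1 ∈ PySem.List.sorted K (fun k => k) false := by
    intro x hx
    rcases List.mem_flatMap.mp ((pv_mem_isortA _ x).mp hx) with ⟨k, hkK, hxg⟩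
    rw [hg k hkK x hxg]
    exact hperm.mem_iff.mpr hkK
  calc pvIsort pvBA (K.flatMap g)
      = (PySem.List.sorted K (fun k => k) false).flatMap
          (fun k => (pvIsort pvBA (K.flatMap g)).filter (fun z => z.1 == k)) :=
        (pv_sorted_decomp _ _ (pv_isortA_pairwise _) hkslt hmem).symm
    _ = (PySem.List.sorted K (fun k => k) false).flatMap
          (fun k => pvIsort pvBA ((K.flatMap g).filter (fun z => z.1 == k))) :=
        List.flatMap_congr (fun k _ =>
          g_filter_isort pvBA pvBA_asym pvBA_trans2 (fun z => z.1 == k) _)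
    _ = (PySem.List.sorted K (fun k => k) false).flatMap (fun k => pvIsort pvBA (g k)) :=
        List.flatMap_congr (fun k hk => by
          rw [pv_flatMap_filter_single K hK g hg k (hperm.mem_iff.mp hk)])
    _ = (PySem.List.sorted K (fun k => k) false).flatMap (fun k => pvIsort pvBB (g k)) :=
        List.flatMap_congr (fun k hk =>
          pv_isort_const k (g k) (hg k (hperm.mem_iff.mp hk)))

-- ---- B's run scan ----

def pvStep (mv : Int) (st : List PvQ × List PvQ) (n : PvQ) : List PvQ × List PvQ :=
  if st.2 ≠ [] ∧ st.2.headI.1 ≠ n.1 then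
    (st.1 ++ PySem.List.slice st.2 none (some mv), [n])
  else (st.1, st.2 ++ [n])

def pvFlush (mv : Int) (st : List PvQ × List PvQ) : List PvQ :=
  if st.2 ≠ [] then st.1 ++ PySem.List.slice st.2 none (some mv) else st.1

lemma pv_alt_eq (notes : List PvQ) (mv : Int) :
    cap_polyphony_by_onset_alt notes mv =
      pvIsort pvBA (pvFlush mv ((pvIsort pvBO (pvIsort pvB2 notes)).foldl (pvStep mv) ([], []))) := rfl

-- the distinct first components, in first-occurrence order
def pvKeysOf : List PvQ → List Int
  | [] => []
  | x :: t => x.1 :: pvKeysOf (t.filter (fun z => !(z.1 == x.1)))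
termination_by l => l.length
decreasing_by
  simpa using Nat.lt_succ_of_le
    (le_trans (List.length_filter_le _ _) (Nat.le_of_eq (List.length_attach (l := t))))

lemma pv_keysOf_mem_aux : ∀ (n : Nat) (l : List PvQ), l.length ≤ n →
    ∀ k : Int, (k ∈ pvKeysOf l ↔ ∃ x ∈ l, x.1 = k) := by
  intro n
  induction n with
  | zero =>
    intro l hl k
    rw [List.length_eq_zero_iff.mp (Nat.le_zero.mp hl), pvKeysOf]
    simp
  | succ n ih =>
    intro l hl k
    cases l with
    | nil => rw [pvKeysOf]; simp
    | cons x t =>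
      rw [pvKeysOf]
      have hlen : (t.filter (fun z => !(z.1 == x.1))).length ≤ n := by
        have := List.length_filter_le (fun z => !(z.1 == x.1)) t
        simp at hl; omega
      constructor
      · intro hk
        rcases List.mem_cons.mp hk with rfl | hk
        · exact ⟨x, by simp⟩
        · rcases (ih _ hlen k).mp hk with ⟨z, hz, hzk⟩
          exact ⟨z, by simp [(List.mem_filter.mp hz).1], hzk⟩
      · rintro ⟨z, hz, rfl⟩
        rcases List.mem_cons.mp hz with rfl | hz
        · simp
        · by_cases hzx : z.1 = x.1
          · simp [hzx]
          · exact List.mem_cons.mpr (Or.inr ((ih _ hlen z.1).mpr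
              ⟨z, List.mem_filter.mpr ⟨hz, by simp [hzx]⟩, rfl⟩))

lemma pv_keysOf_mem (l : List PvQ) (k : Int) : k ∈ pvKeysOf l ↔ ∃ x ∈ l, x.1 = k :=
  pv_keysOf_mem_aux l.length l le_rfl k

lemma pv_keysOf_nodup_aux : ∀ (n : Nat) (l : List PvQ), l.length ≤ n → (pvKeysOf l).Nodup := by
  intro n
  induction n with
  | zero =>
    intro l hl
    rw [List.length_eq_zero_iff.mp (Nat.le_zero.mp hl), pvKeysOf]
    simp
  | succ n ih =>
    intro l hl
    cases l with
    | nil => rw [pvKeysOf]; simp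
    | cons x t =>
      rw [pvKeysOf]
      have hlen : (t.filter (fun z => !(z.1 == x.1))).length ≤ n := by
        have := List.length_filter_le (fun z => !(z.1 == x.1)) t
        simp at hl; omega
      refine List.nodup_cons.mpr ⟨?_, ih _ hlen⟩
      intro hmem
      rcases (pv_keysOf_mem _ _).mp hmem with ⟨z, hz, hzk⟩
      have := (List.mem_filter.mp hz).2
      simp [hzk] at this

lemma pv_keysOf_nodup (l : List PvQ) : (pvKeysOf l).Nodup :=
  pv_keysOf_nodup_aux l.length l le_rfl

lemma pv_fold_run (mv : Int) : ∀ (l : List PvQ) (out run : List PvQ) (k : Int),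
    run ≠ [] → (∀ x ∈ run, x.1 = k) →
    l.Pairwise (fun a b => a.1 ≤ b.1) → (∀ x ∈ l, k ≤ x.1) →
    pvFlush mv (l.foldl (pvStep mv) (out, run)) =
      out ++ PySem.List.slice (run ++ l.filter (fun z => z.1 == k)) none (some mv)
        ++ pvFlush mv ((l.filter (fun z => !(z.1 == k))).foldl (pvStep mv) ([], [])) := by
  intro l
  induction l with
  | nil =>
    intro out run k hne hrun _ _
    simp [pvFlush, hne]
  | cons x t ih =>
    intro out run k hne hrun hl hk
    rcases List.pairwise_cons.mp hl with ⟨hx, ht⟩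
    have hhead : run.headI.1 = k := by
      cases run with
      | nil => exact absurd rfl hne
      | cons r rs => exact hrun r (by simp)
    by_cases hxk : x.1 = k
    · have hstep : pvStep mv (out, run) x = (out, run ++ [x]) := by
        simp [pvStep, hhead, hxk, hne]
      rw [List.foldl_cons, hstep,
        ih out (run ++ [x]) k (by simp) ?hrun ht ?hk]
      · have h1 : (x :: t).filter (fun z => z.1 == k) = x :: t.filter (fun z => z.1 == k) := by
          simp [hxk]
        have h2 : (x :: t).filter (fun z => !(z.1 == k)) = t.filter (fun z => !(z.1 == k)) := by
          simp [hxk]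
        rw [h1, h2]
        simp
      case hrun =>
        intro z hz
        rcases List.mem_append.mp hz with hz | hz
        · exact hrun z hz
        · rw [List.mem_singleton.mp hz]; exact hxk
      case hk =>
        intro z hz
        calc k = x.1 := hxk.symm
          _ ≤ z.1 := hx z hz
    · have hkx : k < x.1 := lt_of_le_of_ne (hk x (by simp)) (fun h => hxk h.symm)
      have ht_nok : ∀ z ∈ t, (z.1 == k) = false := by
        intro z hz
        have := hx z hz
        simp; omega
      have hstep : pvStep mv (out, run) x =
          (out ++ PySem.List.slice run none (some mv), [x]) := by
        simp only [pvStep]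
        rw [if_pos ⟨hne, by rw [hhead]; omega⟩]
      have hfilter_eq : (x :: t).filter (fun z => z.1 == k) = [] := by
        apply List.filter_eq_nil_iff.mpr
        intro z hz
        rcases List.mem_cons.mp hz with rfl | hz
        · simp [hxk]
        · simp [ht_nok z hz]
      have hfilter_ne : (x :: t).filter (fun z => !(z.1 == k)) = x :: t := by
        apply List.filter_eq_self.mpr
        intro z hz
        rcases List.mem_cons.mp hz with rfl | hz
        · simp [hxk]
        · simp [ht_nok z hz]
      have hstep0 : pvStep mv ([], []) x = ([], [x]) := by
        simp only [pvStep]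
        rw [if_neg (by rintro ⟨hcc, -⟩; exact hcc rfl)]
        simp
      rw [List.foldl_cons, hstep,
        ih (out ++ PySem.List.slice run none (some mv)) [x] x.1 (by simp)
          (by intro z hz; rw [List.mem_singleton.mp hz]) ht (fun z hz => hx z hz),
        hfilter_eq, hfilter_ne, List.foldl_cons, hstep0,
        ih [] [x] x.1 (by simp) (by intro z hz; rw [List.mem_singleton.mp hz]) ht
          (fun z hz => hx z hz)]
      simp

lemma pv_fold_flat (mv : Int) : ∀ (n : Nat) (l : List PvQ), l.length ≤ n →
    l.Pairwise (fun a b => a.1 ≤ b.1) →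
    pvFlush mv (l.foldl (pvStep mv) ([], [])) =
      (pvKeysOf l).flatMap
        (fun k => PySem.List.slice (l.filter (fun z => z.1 == k)) none (some mv)) := by
  intro n
  induction n with
  | zero =>
    intro l hlen _
    rw [List.length_eq_zero_iff.mp (Nat.le_zero.mp hlen), pvKeysOf]
    simp [pvFlush]
  | succ n ih =>
    intro l hlen hl
    cases l with
    | nil => rw [pvKeysOf]; simp [pvFlush]
    | cons x t =>
      rcases List.pairwise_cons.mp hl with ⟨hx, ht⟩
      have hstep0 : pvStep mv ([], []) x = ([], [x]) := by
        simp only [pvStep]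
        rw [if_neg (by rintro ⟨hcc, -⟩; exact hcc rfl)]
        simp
      rw [List.foldl_cons, hstep0,
        pv_fold_run mv t [] [x] x.1 (by simp)
          (by intro z hz; rw [List.mem_singleton.mp hz]) ht (fun z hz => hx z hz)]
      set t' := t.filter (fun z => !(z.1 == x.1)) with ht'
      have hlen' : t'.length ≤ n := by
        rw [ht']
        have h1 := List.length_filter_le (fun z => !(z.1 == x.1)) t
        simp at hlen
        omega
      rw [ih t' hlen' (ht.sublist List.filter_sublist)]
      rw [show pvKeysOf (x :: t) = x.1 :: pvKeysOf t' by rw [pvKeysOf]]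
      rw [List.flatMap_cons]
      have h1 : (x :: t).filter (fun z => z.1 == x.1) = x :: t.filter (fun z => z.1 == x.1) := by
        simp
      have hcongr : ∀ k ∈ pvKeysOf t',
          PySem.List.slice (t'.filter (fun z => z.1 == k)) none (some mv) =
            PySem.List.slice ((x :: t).filter (fun z => z.1 == k)) none (some mv) := by
        intro k hk
        rcases (pv_keysOf_mem t' k).mp hk with ⟨z, hz, hzk⟩
        have hkx : k ≠ x.1 := by
          have := (List.mem_filter.mp hz).2
          simp at this
          omega
        have hfeq : t'.filter (fun z => z.1 == k) = (x :: t).filter (fun z => z.1 == k) := by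
          rw [ht', List.filter_filter]
          have hhead : (x :: t).filter (fun z => z.1 == k) = t.filter (fun z => z.1 == k) := by
            simp [show (x.1 == k) = false by simp; omega]
          rw [hhead]
          apply List.filter_congr
          intro z' _
          by_cases hz' : z'.1 = k
          · simp [hz']; omega
          · simp [hz']
        rw [hfeq]
      rw [List.flatMap_congr hcongr, h1]
      simp

-- B's sorted srt: its per-onset fibres are A's sorted buckets
lemma pv_srt_filter (notes : List PvQ) (k : Int) :
    (pvIsort pvBO (pvIsort pvB2 notes)).filter (fun z => z.1 == k) =
      pvIsort pvB2 (notes.filter (fun z => z.1 == k)) := by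
  rw [g_filter_isort pvBO pvBO_asym pvBO_trans2,
    g_filter_isort pvB2 pvB2_asym pvB2_trans2]
  apply g_isort_id
  intro a ha b hb
  have ha1 : a.1 = k := by
    have := (List.mem_filter.mp ((pv_mem_isortB2 _ a).mp ha)).2
    simpa using this
  have hb1 : b.1 = k := by
    have := (List.mem_filter.mp ((pv_mem_isortB2 _ b).mp hb)).2
    simpa using this
  simp [pvBO, ha1, hb1]

lemma pv_srt_pairwise (notes : List PvQ) :
    (pvIsort pvBO (pvIsort pvB2 notes)).Pairwise (fun a b => a.1 ≤ b.1) := by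
  rw [← sorted_eq_pvIsortO]
  exact PySem.List.sorted_pairwise (pvIsort pvB2 notes) (fun n : PvQ => n.1)

lemma pv_srt_perm (notes : List PvQ) : (pvIsort pvBO (pvIsort pvB2 notes)).Perm notes := by
  rw [← sorted_eq_pvIsortO, ← sorted2_eq_pvIsortB2]
  exact (PySem.List.sorted_perm _ _ _).trans (PySem.List.sorted2_perm _ _ _ _)

-- ---- the main equality ----

lemma pv_main (notes : List PvQ) (mv : Int) :
    cap_polyphony_by_onset notes mv = cap_polyphony_by_onset_alt notes mv := by
  -- A's side: reduce to the canonical form over the dict's key list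
  rw [pv_alt_eq]
  simp only [cap_polyphony_by_onset]
  set d := notes.foldl (fun d n => d.modify n.1 [] (fun b => b ++ [n])) PySem.Dict.empty with hd
  have hkeys : d.keys = PySem.Set.ofList (notes.map (fun n => n.1)) := by
    rw [hd, PySem.Dict.keys_foldl_modify_key notes (fun n => n.1) [] (fun _ n => (· ++ [n]))
      PySem.Dict.empty]
    simp [PySem.Dict.keys_empty, PySem.Set.update_nil_left]
  have hnodup : d.keys.Nodup := by
    rw [hkeys]; exact PySem.Set.nodup_ofList _
  have hgetD : ∀ k, d.getD k [] = notes.filter (fun n => n.1 == k) := by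
    intro k
    have h0 : d.getD k [] = ((notes.map (fun n => (n.1, n))).foldl
        (fun d p => d.modify p.1 [] (fun b => b ++ [p.2])) PySem.Dict.empty).getD k [] := by
      rw [hd, List.foldl_map]
    rw [h0, PySem.Dict.getD_foldl_modify_append, List.filter_map]
    simp [Function.comp_def, PySem.Dict.getD_empty]
  have hitems : d.items = d.keys.map (fun k => (k, d.getD k [])) :=
    PySem.Dict.items_eq_map_keys d hnodup []
  rw [PySem.List.foldl_append_eq_flatMap, List.nil_append, hitems, List.flatMap_map,
    sorted2_eq_pvIsortA]
  simp only [sorted2_eq_pvIsortB2]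
  -- both sides are now pvIsortA of a flatMap over a Nodup key list; apply pv_core to each
  have hgA : ∀ k ∈ d.keys, ∀ x ∈ PySem.List.slice (pvIsort pvB2 (d.getD k [])) none (some mv),
      x.1 = k := by
    intro k _ x hx
    have hx1 : x ∈ pvIsort pvB2 (d.getD k []) := PySem.List.mem_of_mem_slice _ _ _ hx
    have hx2 : x ∈ d.getD k [] := (pv_mem_isortB2 _ x).mp hx1
    rw [hgetD k] at hx2
    simpa using (List.mem_filter.mp hx2).2
  rw [pv_core d.keys _ hnodup hgA]
  -- B's side
  set srt := pvIsort pvBO (pvIsort pvB2 notes) with hsrt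
  rw [pv_fold_flat mv srt.length srt le_rfl (pv_srt_pairwise notes)]
  have hgB : ∀ k ∈ pvKeysOf srt,
      ∀ x ∈ PySem.List.slice (srt.filter (fun z => z.1 == k)) none (some mv), x.1 = k := by
    intro k _ x hx
    have hx1 : x ∈ srt.filter (fun z => z.1 == k) := PySem.List.mem_of_mem_slice _ _ _ hx
    simpa using (List.mem_filter.mp hx1).2
  rw [pv_core (pvKeysOf srt) _ (pv_keysOf_nodup srt) hgB]
  -- the two sorted key lists coincide
  have hKperm : (pvKeysOf srt).Perm d.keys := by
    apply (List.perm_ext_iff_of_nodup (pv_keysOf_nodup srt) hnodup).mpr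
    intro k
    rw [pv_keysOf_mem, hkeys]
    constructor
    · rintro ⟨x, hx, rfl⟩
      exact (PySem.Set.mem_ofList _ _).mpr
        (List.mem_map.mpr ⟨x, (pv_srt_perm notes).mem_iff.mp hx, rfl⟩)
    · intro hk
      rcases List.mem_map.mp ((PySem.Set.mem_ofList _ _).mp hk) with ⟨x, hx, rfl⟩
      exact ⟨x, (pv_srt_perm notes).mem_iff.mpr hx, rfl⟩
  rw [PySem.List.sorted_eq_sorted_of_perm _ _ (fun k => k) (fun a b h => h) hKperm]
  -- and so do the per-key summands
  apply List.flatMap_congr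
  intro k _
  rw [pv_srt_filter, hgetD k]

-- ===== VERDICT (by name: the statement is the Claim_ definition above) =====
theorem cap_polyphony_by_onset_spec : Claim_equal_cap_polyphony_by_onset := by
  intro notes max_voices _
  unfold Spec_cap_polyphony_by_onset
  exact pv_main notes max_voices
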